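-- pv_equiv track=rewrite | github.com/LuisAlexisSalazar/cancer_detection | imgDescriptors/brint.py | get_min_for_revolve
-- ===== SOURCE A (Python) =====
-- def get_min_for_revolve(arr):
--     # ?Almacene el valor después de cada turno y finalmente seleccione el que tenga el valor más pequeño
--     values = []
--     # ?Se utiliza para desplazamiento cíclico, y su correspondiente sistema decimal se calcula respectivamente
--     circle = arr * 2
--     for i in range(0, 8):
--         j = 0
--         sum = 0
--         bit_sum = 0
--         while j < 8:
--             sum += circle[i + j] << bit_sum
--             bit_sum += 1
--             j += 1
--         values.append(sum)
--     return min(values)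
-- ===== SOURCE B (Python) =====
-- def _slide(circle, value, i):
--     # value of rotation i from the value of rotation i+1
--     return (value - (circle[i + 8] << 7)) * 2 + circle[i]
--
-- def get_min_for_revolve(arr):
--     # one full 8-bit sum for the last rotation, then seven backward slides
--     circle = arr * 2
--     value = 0
--     for j in range(8):
--         value += circle[7 + j] << j
--     best = value
--     for i in range(6, -1, -1):
--         value = _slide(circle, value, i)
--         if value < best:
--             best = value
--     return best
-- ===== Notes on version B (the rewrite author's own statement) =====
-- stated objective: alternative
-- what changed: Instead of recomputing each of the 8 rotation values with an inner 8-step shift-add loop, B computes one rotation value fully and derives the other seven incrementally via value = (value - (circle[i+8]<<7))*2 + circle[i], tracking a running minimum.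
import Mathlib
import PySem

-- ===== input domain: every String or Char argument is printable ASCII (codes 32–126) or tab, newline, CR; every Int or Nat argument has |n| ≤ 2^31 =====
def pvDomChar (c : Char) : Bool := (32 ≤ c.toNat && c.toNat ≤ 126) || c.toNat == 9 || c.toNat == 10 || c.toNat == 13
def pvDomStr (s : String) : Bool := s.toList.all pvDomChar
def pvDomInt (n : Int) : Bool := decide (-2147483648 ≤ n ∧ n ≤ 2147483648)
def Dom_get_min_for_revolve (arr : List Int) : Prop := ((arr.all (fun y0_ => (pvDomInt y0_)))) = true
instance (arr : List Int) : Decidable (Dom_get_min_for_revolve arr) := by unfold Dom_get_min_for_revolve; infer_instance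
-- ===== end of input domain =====

-- B replaces A's 8×8 nested recomputation of each rotation value by one full 8-term
-- sum plus seven incremental slides with a running minimum (alternative algorithm; same cost).

-- ===== PORT A =====
-- the inner 'while j < 8' loop of A, transliterated with fuel 8 (j starts at 0)
def pvWhileA (circle : List Int) (i j sum bit_sum : Int) : Nat → Int
  | 0 => sum
  | Nat.succ f =>
    if j < 8 then
      pvWhileA circle i (j + 1) (sum + (PySem.List.pyGetD circle (i + j) 0 <<< bit_sum.toNat)) (bit_sum + 1) f
    else sum

def get_min_for_revolve (arr : List Int) : Int :=
  let circle := arr ++ arr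
  let values := (PySem.List.pyRange 0 8 1).foldl (fun vs i => vs ++ [pvWhileA circle i 0 0 0 8]) ([] : List Int)
  (PySem.List.min? values (fun y => y)).getD 0

-- ===== PORT B =====
-- _slide of Source B: one step from rotation i+1's value to rotation i's value
def pvSlide (circle : List Int) (v i : Int) : Int :=
  (v - (PySem.List.pyGetD circle (i + 8) 0 <<< (7:Nat))) * 2 + PySem.List.pyGetD circle i 0

def get_min_for_revolve_alt (arr : List Int) : Int :=
  let circle := arr ++ arr
  let value := (PySem.List.pyRange 0 8 1).foldl
      (fun v j => v + (PySem.List.pyGetD circle (7 + j) 0 <<< j.toNat)) (0 : Int)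
  let p := (PySem.List.pyRange 6 (-1) (-1)).foldl
      (fun (p : Int × Int) i =>
        let v := pvSlide circle p.2 i
        (if v < p.1 then v else p.1, v)) (value, value)
  p.1

-- ===== PRECONDITION & SPEC =====
-- Both Pythons index circle = arr*2 up to position 14, so both raise IndexError exactly
-- when len(arr) < 8; Pre_ admits exactly the inputs on which A returns.
def Pre_get_min_for_revolve (arr : List Int) : Prop := 8 ≤ arr.length
instance (arr : List Int) : Decidable (Pre_get_min_for_revolve arr) := by unfold Pre_get_min_for_revolve; infer_instance
def pvWitness_get_min_for_revolve : List Int := [1, 0, 1, 1, 0, 0, 1, 0]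

def Spec_get_min_for_revolve (arr : List Int) (out : Int) : Prop := out = get_min_for_revolve_alt arr
instance (arr : List Int) (out : Int) : Decidable (Spec_get_min_for_revolve arr out) := by unfold Spec_get_min_for_revolve; infer_instance

-- ===== CLAIM (what is proved, stated in full; the proofs are below) =====
def Claim_equal_get_min_for_revolve : Prop := ∀ (arr : List Int), Dom_get_min_for_revolve arr → Pre_get_min_for_revolve arr → Spec_get_min_for_revolve arr (get_min_for_revolve arr)

-- ===== LEMMAS AND PROOFS =====

-- value sequence generated by repeatedly applying f (proof-only helper)
def pvValSeq (f : Int → Int → Int) (v : Int) : List Int → List Int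
  | [] => []
  | i :: is => f v i :: pvValSeq f (f v i) is

-- B's running-minimum pair fold is a foldl of min over the generated value sequence
lemma foldl_pair_min (f : Int → Int → Int) (l : List Int) (best v : Int) :
    (l.foldl (fun (p : Int × Int) i =>
        (if f p.2 i < p.1 then f p.2 i else p.1, f p.2 i)) (best, v)).1
      = (pvValSeq f v l).foldl min best := by
  induction l generalizing best v with
  | nil => rfl
  | cons i is ih =>
    simp only [List.foldl, pvValSeq, ih]
    congr 1
    omega

-- closed form of A's inner while loop
lemma whileA_eq (c : List Int) (i : Int) :
    pvWhileA c i 0 0 0 8 =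
      PySem.List.pyGetD c i 0 + 2 * PySem.List.pyGetD c (i+1) 0 + 4 * PySem.List.pyGetD c (i+2) 0
      + 8 * PySem.List.pyGetD c (i+3) 0 + 16 * PySem.List.pyGetD c (i+4) 0 + 32 * PySem.List.pyGetD c (i+5) 0
      + 64 * PySem.List.pyGetD c (i+6) 0 + 128 * PySem.List.pyGetD c (i+7) 0 := by
  norm_num [pvWhileA, Int.shiftLeft_eq, show ((2:Int).toNat)=2 from rfl, show ((3:Int).toNat)=3 from rfl, show ((4:Int).toNat)=4 from rfl, show ((5:Int).toNat)=5 from rfl, show ((6:Int).toNat)=6 from rfl, show ((7:Int).toNat)=7 from rfl]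
  ring

-- B's initial full sum is A's rotation-7 value
lemma pv_v7 (c : List Int) :
    List.foldl (fun v j => v + (PySem.List.pyGetD c (7 + j) 0 <<< j.toNat)) (0:Int) [0,1,2,3,4,5,6,7]
      = pvWhileA c 7 0 0 0 8 := by
  simp only [List.foldl, whileA_eq, Int.shiftLeft_eq,
    show ((0:Int).toNat)=0 from rfl, show ((1:Int).toNat)=1 from rfl, show ((2:Int).toNat)=2 from rfl,
    show ((3:Int).toNat)=3 from rfl, show ((4:Int).toNat)=4 from rfl, show ((5:Int).toNat)=5 from rfl,
    show ((6:Int).toNat)=6 from rfl, show ((7:Int).toNat)=7 from rfl,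
    show ((7:Int)+0)=(7:Int) from by decide,
    show ((7:Int)+1)=(8:Int) from by decide,
    show ((7:Int)+2)=(9:Int) from by decide,
    show ((7:Int)+3)=(10:Int) from by decide,
    show ((7:Int)+4)=(11:Int) from by decide,
    show ((7:Int)+5)=(12:Int) from by decide,
    show ((7:Int)+6)=(13:Int) from by decide,
    show ((7:Int)+7)=(14:Int) from by decide]
  omega


lemma pv_sl0 (c : List Int) :
    pvSlide c (pvWhileA c 1 0 0 0 8) 0 = pvWhileA c 0 0 0 0 8 := by
  simp only [pvSlide, whileA_eq, Int.shiftLeft_eq,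
    show ((2:Int)^(7:Nat))=128 from by decide,
    show ((1:Int)+1)=(2:Int) from by decide,
    show ((1:Int)+2)=(3:Int) from by decide,
    show ((1:Int)+3)=(4:Int) from by decide,
    show ((1:Int)+4)=(5:Int) from by decide,
    show ((1:Int)+5)=(6:Int) from by decide,
    show ((1:Int)+6)=(7:Int) from by decide,
    show ((1:Int)+7)=(8:Int) from by decide,
    show ((0:Int)+1)=(1:Int) from by decide,
    show ((0:Int)+2)=(2:Int) from by decide,
    show ((0:Int)+3)=(3:Int) from by decide,
    show ((0:Int)+4)=(4:Int) from by decide,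
    show ((0:Int)+5)=(5:Int) from by decide,
    show ((0:Int)+6)=(6:Int) from by decide,
    show ((0:Int)+7)=(7:Int) from by decide,
    show ((0:Int)+8)=(8:Int) from by decide]
  omega

lemma pv_sl1 (c : List Int) :
    pvSlide c (pvWhileA c 2 0 0 0 8) 1 = pvWhileA c 1 0 0 0 8 := by
  simp only [pvSlide, whileA_eq, Int.shiftLeft_eq,
    show ((2:Int)^(7:Nat))=128 from by decide,
    show ((2:Int)+1)=(3:Int) from by decide,
    show ((2:Int)+2)=(4:Int) from by decide,
    show ((2:Int)+3)=(5:Int) from by decide,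
    show ((2:Int)+4)=(6:Int) from by decide,
    show ((2:Int)+5)=(7:Int) from by decide,
    show ((2:Int)+6)=(8:Int) from by decide,
    show ((2:Int)+7)=(9:Int) from by decide,
    show ((1:Int)+1)=(2:Int) from by decide,
    show ((1:Int)+2)=(3:Int) from by decide,
    show ((1:Int)+3)=(4:Int) from by decide,
    show ((1:Int)+4)=(5:Int) from by decide,
    show ((1:Int)+5)=(6:Int) from by decide,
    show ((1:Int)+6)=(7:Int) from by decide,
    show ((1:Int)+7)=(8:Int) from by decide,
    show ((1:Int)+8)=(9:Int) from by decide]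
  omega

lemma pv_sl2 (c : List Int) :
    pvSlide c (pvWhileA c 3 0 0 0 8) 2 = pvWhileA c 2 0 0 0 8 := by
  simp only [pvSlide, whileA_eq, Int.shiftLeft_eq,
    show ((2:Int)^(7:Nat))=128 from by decide,
    show ((3:Int)+1)=(4:Int) from by decide,
    show ((3:Int)+2)=(5:Int) from by decide,
    show ((3:Int)+3)=(6:Int) from by decide,
    show ((3:Int)+4)=(7:Int) from by decide,
    show ((3:Int)+5)=(8:Int) from by decide,
    show ((3:Int)+6)=(9:Int) from by decide,
    show ((3:Int)+7)=(10:Int) from by decide,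
    show ((2:Int)+1)=(3:Int) from by decide,
    show ((2:Int)+2)=(4:Int) from by decide,
    show ((2:Int)+3)=(5:Int) from by decide,
    show ((2:Int)+4)=(6:Int) from by decide,
    show ((2:Int)+5)=(7:Int) from by decide,
    show ((2:Int)+6)=(8:Int) from by decide,
    show ((2:Int)+7)=(9:Int) from by decide,
    show ((2:Int)+8)=(10:Int) from by decide]
  omega

lemma pv_sl3 (c : List Int) :
    pvSlide c (pvWhileA c 4 0 0 0 8) 3 = pvWhileA c 3 0 0 0 8 := by
  simp only [pvSlide, whileA_eq, Int.shiftLeft_eq,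
    show ((2:Int)^(7:Nat))=128 from by decide,
    show ((4:Int)+1)=(5:Int) from by decide,
    show ((4:Int)+2)=(6:Int) from by decide,
    show ((4:Int)+3)=(7:Int) from by decide,
    show ((4:Int)+4)=(8:Int) from by decide,
    show ((4:Int)+5)=(9:Int) from by decide,
    show ((4:Int)+6)=(10:Int) from by decide,
    show ((4:Int)+7)=(11:Int) from by decide,
    show ((3:Int)+1)=(4:Int) from by decide,
    show ((3:Int)+2)=(5:Int) from by decide,
    show ((3:Int)+3)=(6:Int) from by decide,
    show ((3:Int)+4)=(7:Int) from by decide,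
    show ((3:Int)+5)=(8:Int) from by decide,
    show ((3:Int)+6)=(9:Int) from by decide,
    show ((3:Int)+7)=(10:Int) from by decide,
    show ((3:Int)+8)=(11:Int) from by decide]
  omega

lemma pv_sl4 (c : List Int) :
    pvSlide c (pvWhileA c 5 0 0 0 8) 4 = pvWhileA c 4 0 0 0 8 := by
  simp only [pvSlide, whileA_eq, Int.shiftLeft_eq,
    show ((2:Int)^(7:Nat))=128 from by decide,
    show ((5:Int)+1)=(6:Int) from by decide,
    show ((5:Int)+2)=(7:Int) from by decide,
    show ((5:Int)+3)=(8:Int) from by decide,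
    show ((5:Int)+4)=(9:Int) from by decide,
    show ((5:Int)+5)=(10:Int) from by decide,
    show ((5:Int)+6)=(11:Int) from by decide,
    show ((5:Int)+7)=(12:Int) from by decide,
    show ((4:Int)+1)=(5:Int) from by decide,
    show ((4:Int)+2)=(6:Int) from by decide,
    show ((4:Int)+3)=(7:Int) from by decide,
    show ((4:Int)+4)=(8:Int) from by decide,
    show ((4:Int)+5)=(9:Int) from by decide,
    show ((4:Int)+6)=(10:Int) from by decide,
    show ((4:Int)+7)=(11:Int) from by decide,
    show ((4:Int)+8)=(12:Int) from by decide]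
  omega

lemma pv_sl5 (c : List Int) :
    pvSlide c (pvWhileA c 6 0 0 0 8) 5 = pvWhileA c 5 0 0 0 8 := by
  simp only [pvSlide, whileA_eq, Int.shiftLeft_eq,
    show ((2:Int)^(7:Nat))=128 from by decide,
    show ((6:Int)+1)=(7:Int) from by decide,
    show ((6:Int)+2)=(8:Int) from by decide,
    show ((6:Int)+3)=(9:Int) from by decide,
    show ((6:Int)+4)=(10:Int) from by decide,
    show ((6:Int)+5)=(11:Int) from by decide,
    show ((6:Int)+6)=(12:Int) from by decide,
    show ((6:Int)+7)=(13:Int) from by decide,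
    show ((5:Int)+1)=(6:Int) from by decide,
    show ((5:Int)+2)=(7:Int) from by decide,
    show ((5:Int)+3)=(8:Int) from by decide,
    show ((5:Int)+4)=(9:Int) from by decide,
    show ((5:Int)+5)=(10:Int) from by decide,
    show ((5:Int)+6)=(11:Int) from by decide,
    show ((5:Int)+7)=(12:Int) from by decide,
    show ((5:Int)+8)=(13:Int) from by decide]
  omega

lemma pv_sl6 (c : List Int) :
    pvSlide c (pvWhileA c 7 0 0 0 8) 6 = pvWhileA c 6 0 0 0 8 := by
  simp only [pvSlide, whileA_eq, Int.shiftLeft_eq,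
    show ((2:Int)^(7:Nat))=128 from by decide,
    show ((7:Int)+1)=(8:Int) from by decide,
    show ((7:Int)+2)=(9:Int) from by decide,
    show ((7:Int)+3)=(10:Int) from by decide,
    show ((7:Int)+4)=(11:Int) from by decide,
    show ((7:Int)+5)=(12:Int) from by decide,
    show ((7:Int)+6)=(13:Int) from by decide,
    show ((7:Int)+7)=(14:Int) from by decide,
    show ((6:Int)+1)=(7:Int) from by decide,
    show ((6:Int)+2)=(8:Int) from by decide,
    show ((6:Int)+3)=(9:Int) from by decide,
    show ((6:Int)+4)=(10:Int) from by decide,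
    show ((6:Int)+5)=(11:Int) from by decide,
    show ((6:Int)+6)=(12:Int) from by decide,
    show ((6:Int)+7)=(13:Int) from by decide,
    show ((6:Int)+8)=(14:Int) from by decide]
  omega

theorem get_min_for_revolve_spec : Claim_equal_get_min_for_revolve := by
  intro arr _ _
  unfold Spec_get_min_for_revolve get_min_for_revolve get_min_for_revolve_alt
  rw [show PySem.List.pyRange 0 8 1 = [0,1,2,3,4,5,6,7] from by decide,
      show PySem.List.pyRange 6 (-1) (-1) = [6,5,4,3,2,1,0] from by decide,
      foldl_pair_min (pvSlide (arr ++ arr)), pv_v7]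
  simp only [pvValSeq]
  rw [pv_sl6, pv_sl5, pv_sl4, pv_sl3, pv_sl2, pv_sl1, pv_sl0]
  simp only [List.foldl, List.nil_append, List.cons_append]
  rw [PySem.List.min?_id_cons]
  simp only [Option.getD_some, List.foldl]
  ac_rfl
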